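-- pv_equiv track=rewrite | github.com/yhoogstrate/dr-disco | drdisco/CigarAlignment.py | cleanup_cigar
-- ===== SOURCE A (Python) =====
-- def cleanup_cigar(cigartup, invalid_chunks):
--     clean = []
--
--     # Removal of wrong chunks
--     for chunk in cigartup:
--         if chunk[0] not in invalid_chunks:
--             clean.append(chunk)
--
--     # Merging those that become adjacent to each other
--     #   E.g. removal of 'N' in 6M10N6M -> 6M6M -> 12M
--     # or:    [(4, 17), (0, 55), (1, 1), (0, 53)] -> [(4, 17), (0, 108)]
--
--     last_type = -1
--     concat = []
--
--     for chunk in clean: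
--         if chunk[0] == last_type:
--
--             # increase last insert
--             concat[-1] = (chunk[0], concat[-1][1] + chunk[1])
--         else:
--             concat.append(chunk)
--             last_type = chunk[0]
--
--     return concat
-- ===== SOURCE B (Python) =====
-- def cleanup_cigar(cigartup, invalid_chunks):
--     f = [c for c in cigartup if c[0] not in invalid_chunks]
--     res = []
--     i, n = 0, len(f)
--     while i < n:
--         t = f[i][0]
--         j = i
--         total = 0
--         while j < n and f[j][0] == t:
--             total += f[j][1]
--             j += 1
--         res.append((t, total))
--         i = j
--     return res
-- ===== Notes on version B (the rewrite author's own statement) =====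
-- stated objective: alternative
-- what changed: Replaces A's incremental merge (a -1 last_type sentinel, updating concat[-1] chunk by chunk) by run-boundary scanning: after filtering, a two-pointer loop consumes each maximal run of equal types in one inner scan and emits its summed length at once.
-- crash fix: When the first chunk whose type is not in invalid_chunks has type -1, A raises IndexError (its -1 sentinel makes it update concat[-1] of an empty list) while B returns the normally merged result. — e.g. on cleanup_cigar([(-1, 3), (-1, 2), (0, 4)], []): A raises IndexError, B returns [(-1, 5), (0, 4)]
import Mathlib
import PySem

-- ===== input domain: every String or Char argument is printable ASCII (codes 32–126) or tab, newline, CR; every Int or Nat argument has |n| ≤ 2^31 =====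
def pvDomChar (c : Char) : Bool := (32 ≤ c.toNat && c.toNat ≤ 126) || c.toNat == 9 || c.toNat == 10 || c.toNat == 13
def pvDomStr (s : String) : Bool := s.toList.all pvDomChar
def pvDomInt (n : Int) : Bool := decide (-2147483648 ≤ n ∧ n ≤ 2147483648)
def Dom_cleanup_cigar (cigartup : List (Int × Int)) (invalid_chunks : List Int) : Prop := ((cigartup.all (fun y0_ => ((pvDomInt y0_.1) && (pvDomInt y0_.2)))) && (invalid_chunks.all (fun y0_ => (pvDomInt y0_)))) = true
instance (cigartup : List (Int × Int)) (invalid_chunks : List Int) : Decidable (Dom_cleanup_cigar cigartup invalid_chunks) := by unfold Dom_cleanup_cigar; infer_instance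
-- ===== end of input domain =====

-- B replaces A's incremental merge (a -1 last_type sentinel, updating concat[-1] chunk by chunk)
-- by run-boundary scanning: filter, then consume each maximal run of equal types in one inner
-- scan and emit its summed length at once (alternative decomposition, same cost).

-- ===== PORT A =====
-- Python's 'concat[-1] = (chunk[0], concat[-1][1] + chunk[1])': on an empty concat Python
-- raises IndexError; that input is excluded by Pre_cleanup_cigar (the getD 0 default is never hit there).
def cleanup_cigar (cigartup : List (Int × Int)) (invalid_chunks : List Int) : List (Int × Int) :=
  let clean : List (Int × Int) :=
    cigartup.foldl (fun acc chunk =>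
      if !(invalid_chunks.contains chunk.1) then acc ++ [chunk] else acc) []
  let r : Int × List (Int × Int) :=
    clean.foldl (fun st chunk =>
      if chunk.1 == st.1 then
        (st.1, st.2.dropLast ++ [(chunk.1, ((st.2.getLast?.map Prod.snd).getD 0) + chunk.2)])
      else
        (chunk.1, st.2 ++ [chunk])) (-1, [])
  r.2

-- ===== PORT B =====
-- Source B's inner 'while j < n and f[j][0] == t' scan of one maximal run is the takeWhile/dropWhile
-- of the remaining list; the outer while loop is the structural recursion over what is left.
def mergeRuns : List (Int × Int) → List (Int × Int)
  | [] => []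
  | c :: rest =>
      (c.1, c.2 + ((rest.takeWhile (fun d => d.1 == c.1)).map Prod.snd).sum)
        :: mergeRuns (rest.dropWhile (fun d => d.1 == c.1))
termination_by l => l.length
decreasing_by
  simpa using Nat.lt_succ_of_le (rest.length_dropWhile_le (fun d => d.1 == c.1))

def cleanup_cigar_alt (cigartup : List (Int × Int)) (invalid_chunks : List Int) : List (Int × Int) :=
  mergeRuns (cigartup.filter (fun c => !(invalid_chunks.contains c.1)))

-- ===== PRECONDITION & SPEC =====
-- Pre_ excludes exactly the inputs on which A raises IndexError: those whose first chunk of a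
-- type not in invalid_chunks has type -1 (A's sentinel collides and it updates concat[-1] of []).
def Pre_cleanup_cigar (cigartup : List (Int × Int)) (invalid_chunks : List Int) : Prop :=
  ((cigartup.filter (fun c => !(invalid_chunks.contains c.1))).head?.map Prod.fst) ≠ some (-1)
instance (cigartup : List (Int × Int)) (invalid_chunks : List Int) : Decidable (Pre_cleanup_cigar cigartup invalid_chunks) := by unfold Pre_cleanup_cigar; infer_instance
def pvWitness_cleanup_cigar : (List (Int × Int)) × List Int := ([(4, 17), (0, 55), (1, 1), (0, 53)], [1])

-- When the first chunk whose type is not in invalid_chunks has type -1, A raises IndexError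
-- (its -1 sentinel makes it update concat[-1] of an empty list) while B returns the merged result.
def Raises_cleanup_cigar (cigartup : List (Int × Int)) (invalid_chunks : List Int) : Prop :=
  ((cigartup.filter (fun c => !(invalid_chunks.contains c.1))).head?.map Prod.fst) = some (-1)
instance (cigartup : List (Int × Int)) (invalid_chunks : List Int) : Decidable (Raises_cleanup_cigar cigartup invalid_chunks) := by unfold Raises_cleanup_cigar; infer_instance
def pvRaiseWitness_cleanup_cigar : (List (Int × Int)) × List Int := ([(-1, 3), (-1, 2), (0, 4)], [])
def pvRaiseWitnessOut_cleanup_cigar : List (Int × Int) := [(-1, 5), (0, 4)]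

def Spec_cleanup_cigar (cigartup : List (Int × Int)) (invalid_chunks : List Int) (out : List (Int × Int)) : Prop := out = cleanup_cigar_alt cigartup invalid_chunks
instance (cigartup : List (Int × Int)) (invalid_chunks : List Int) (out : List (Int × Int)) : Decidable (Spec_cleanup_cigar cigartup invalid_chunks out) := by unfold Spec_cleanup_cigar; infer_instance

-- ===== CLAIM (what is proved, stated in full; the proofs are below) =====
def Claim_equal_cleanup_cigar : Prop := ∀ (cigartup : List (Int × Int)) (invalid_chunks : List Int), Dom_cleanup_cigar cigartup invalid_chunks → Pre_cleanup_cigar cigartup invalid_chunks → Spec_cleanup_cigar cigartup invalid_chunks (cleanup_cigar cigartup invalid_chunks)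
def Claim_raises_cleanup_cigar : Prop := (∀ (cigartup : List (Int × Int)) (invalid_chunks : List Int), Dom_cleanup_cigar cigartup invalid_chunks → Raises_cleanup_cigar cigartup invalid_chunks → ¬ Pre_cleanup_cigar cigartup invalid_chunks) ∧ (Dom_cleanup_cigar (pvRaiseWitness_cleanup_cigar.1) (pvRaiseWitness_cleanup_cigar.2) ∧ Raises_cleanup_cigar (pvRaiseWitness_cleanup_cigar.1) (pvRaiseWitness_cleanup_cigar.2) ∧ cleanup_cigar_alt (pvRaiseWitness_cleanup_cigar.1) (pvRaiseWitness_cleanup_cigar.2) = pvRaiseWitnessOut_cleanup_cigar)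

-- ===== LEMMAS AND PROOFS =====

-- A's first loop builds the filtered list.
theorem filterA (invalid_chunks : List Int) :
    ∀ (l : List (Int × Int)) (acc : List (Int × Int)),
      l.foldl (fun acc chunk =>
        if !(invalid_chunks.contains chunk.1) then acc ++ [chunk] else acc) acc
      = acc ++ l.filter (fun c => !(invalid_chunks.contains c.1)) := by
  intro l
  induction l with
  | nil => intro acc; simp
  | cons c rest ih =>
      intro acc
      cases h : invalid_chunks.contains c.1 with
      | false =>
          simp only [List.foldl_cons, List.filter_cons, h, Bool.not_false, if_true]
          rw [ih]
          simp
      | true =>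
          simp only [List.foldl_cons, List.filter_cons, h, Bool.not_true, Bool.false_eq_true,
            if_false]
          exact ih acc

-- The simple tail-merging fold used as a bridge between A's sentinel fold and mergeRuns.
def foldMerge (init : List (Int × Int)) (l : List (Int × Int)) : List (Int × Int) :=
  l.foldl (fun out d =>
    match out.getLast? with
    | some last => if last.1 == d.1 then out.dropLast ++ [(d.1, last.2 + d.2)] else out ++ [d]
    | none => out ++ [d]) init

-- Once the accumulator is non-empty and A's last_type is the type of its last element,
-- A's merge fold and the tail-merging fold coincide.
theorem mergeEq :
    ∀ (rest pre : List (Int × Int)) (c : Int × Int),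
      (rest.foldl (fun (st : Int × List (Int × Int)) chunk =>
        if chunk.1 == st.1 then
          (st.1, st.2.dropLast ++ [(chunk.1, ((st.2.getLast?.map Prod.snd).getD 0) + chunk.2)])
        else
          (chunk.1, st.2 ++ [chunk])) (c.1, pre ++ [c])).2
      = foldMerge (pre ++ [c]) rest := by
  intro rest
  induction rest with
  | nil => intro pre c; rfl
  | cons d rest ih =>
      intro pre c
      simp only [List.foldl_cons, foldMerge, List.getLast?_concat, List.dropLast_concat]
      by_cases h : d.1 = c.1
      · have hb : (d.1 == c.1) = true := by simp [h]
        have hb' : (c.1 == d.1) = true := by simp [h]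
        simp only [hb, hb', if_true, Option.map_some, Option.getD_some]
        have := ih pre (d.1, c.2 + d.2)
        simpa [foldMerge, h] using this
      · have hb : (d.1 == c.1) = false := by simp [h]
        have hb' : (c.1 == d.1) = false := by simp [Ne.symm h]
        simp only [hb, hb', if_false, Bool.false_eq_true]
        have := ih (pre ++ [c]) d
        simpa [foldMerge] using this

-- The tail-merging fold computes the run decomposition.
theorem runLemma :
    ∀ (l pre : List (Int × Int)) (t v : Int),
      foldMerge (pre ++ [(t, v)]) l
      = pre ++ (t, v + ((l.takeWhile (fun d => d.1 == t)).map Prod.snd).sum)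
          :: mergeRuns (l.dropWhile (fun d => d.1 == t)) := by
  intro l
  induction l with
  | nil =>
      intro pre t v
      simp [foldMerge, mergeRuns]
  | cons d rest ih =>
      intro pre t v
      simp only [foldMerge, List.foldl_cons, List.getLast?_concat, List.dropLast_concat]
      by_cases h : d.1 = t
      · have hb : ((t, v).1 == d.1) = true := by simp [h]
        have hb' : (d.1 == t) = true := by simp [h]
        simp only [List.takeWhile_cons, List.dropWhile_cons, h, beq_self_eq_true, if_true]
        have := ih pre t (v + d.2)
        simp only [foldMerge] at this
        rw [this]
        simp [List.map_cons, List.sum_cons]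
        ring_nf
      · have hb : ((t, v).1 == d.1) = false := by simp [Ne.symm h]
        have hb' : (d.1 == t) = false := by simp [h]
        simp only [hb, if_false, Bool.false_eq_true, List.takeWhile_cons, List.dropWhile_cons, hb']
        have := ih (pre ++ [(t, v)]) d.1 d.2
        simp only [foldMerge] at this
        rw [List.append_assoc] at this ⊢
        rw [this]
        simp [mergeRuns]

-- ===== VERDICT (by name: the statement is the Claim_ definition above) =====
theorem cleanup_cigar_spec : Claim_equal_cleanup_cigar := by
  intro cigartup invalid_chunks _ hpre
  unfold Spec_cleanup_cigar cleanup_cigar cleanup_cigar_alt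
  rw [filterA]
  simp only [List.nil_append]
  unfold Pre_cleanup_cigar at hpre
  cases hcl : cigartup.filter (fun c => !(invalid_chunks.contains c.1)) with
  | nil => simp [mergeRuns]
  | cons c rest =>
      rw [hcl] at hpre
      simp only [List.head?_cons, Option.map_some] at hpre
      have hne : (c.1 == (-1 : Int)) = false := by
        simp only [beq_eq_false_iff_ne, ne_eq]
        intro hh; exact hpre (by rw [hh])
      simp only [List.foldl_cons, hne, if_false, List.nil_append, Bool.false_eq_true]
      have h1 := mergeEq rest [] c
      simp only [List.nil_append] at h1
      rw [h1]
      have h2 := runLemma rest [] c.1 c.2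
      simp only [List.nil_append] at h2
      rw [h2, mergeRuns]

theorem cleanup_cigar_raises : Claim_raises_cleanup_cigar := by
  unfold Claim_raises_cleanup_cigar
  refine ⟨?_, by decide, by decide, ?_⟩
  · intro cigartup invalid_chunks _ hr hp
    unfold Raises_cleanup_cigar at hr
    unfold Pre_cleanup_cigar at hp
    exact hp hr
  · show cleanup_cigar_alt [((-1:Int),(3:Int)), (-1,2), (0,4)] [] = [(-1,5), (0,4)]
    unfold cleanup_cigar_alt
    norm_num [List.filter]
    rw [mergeRuns]; norm_num; rw [mergeRuns]; norm_num [mergeRuns]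

-- self-check: the raise witness lies inside Dom and inside Raises (read off cleanup_cigar_raises)
theorem cleanup_cigar_raises_witness_ok :
    Dom_cleanup_cigar (pvRaiseWitness_cleanup_cigar.1) (pvRaiseWitness_cleanup_cigar.2) ∧
      Raises_cleanup_cigar (pvRaiseWitness_cleanup_cigar.1) (pvRaiseWitness_cleanup_cigar.2) :=
  ⟨cleanup_cigar_raises.2.1, cleanup_cigar_raises.2.2.1⟩
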